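-- pv_equiv track=rewrite | github.com/bpaothatat/aoc | 2023/day9/solution.py | get_next_values
-- ===== SOURCE A (Python) =====
-- def get_next_values(input: list) -> list:
--     result = []
--     current = input
--     while not all(i == current[0] for i in current):
--         result.append(current)
--         next = []
--         for i in range(len(current) - 1):
--             next.append(current[i + 1] - current[i])
--         current = next
--     result.append(current)
--     return result
-- ===== SOURCE B (Python) =====
-- def get_next_values(input: list) -> list:
--     if all(i == input[0] for i in input):
--         return [input]
--     diffs = [input[i + 1] - input[i] for i in range(len(input) - 1)]
--     return [input] + get_next_values(diffs)
-- ===== Notes on version B (the rewrite author's own statement) =====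
-- stated objective: simpler
-- what changed: Replaced the while-loop with result accumulator by direct self-recursion on the difference triangle: base case returns [input] when the row is constant, otherwise [input] + recursion on the consecutive differences.
import Mathlib
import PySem

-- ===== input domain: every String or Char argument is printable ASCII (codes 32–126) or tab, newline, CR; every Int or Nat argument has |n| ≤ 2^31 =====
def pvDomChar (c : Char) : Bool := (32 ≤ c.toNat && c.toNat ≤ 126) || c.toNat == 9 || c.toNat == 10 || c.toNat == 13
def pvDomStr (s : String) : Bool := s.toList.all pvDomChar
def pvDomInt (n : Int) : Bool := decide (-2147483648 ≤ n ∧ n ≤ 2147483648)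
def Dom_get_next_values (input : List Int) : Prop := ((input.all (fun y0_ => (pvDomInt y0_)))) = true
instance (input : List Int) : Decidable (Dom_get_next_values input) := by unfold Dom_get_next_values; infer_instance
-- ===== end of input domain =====

-- B replaces A's while-loop with accumulator by direct self-recursion on the difference triangle (objective: simpler).


-- lemmas the ports need for termination (cited in decreasing_by)
theorem pv_foldl_append {α β : Type} (f : α → β) (xs : List α) (acc : List β) :
    xs.foldl (fun a i => a ++ [f i]) acc = acc ++ xs.map f := by
  induction xs generalizing acc with
  | nil => simp
  | cons x xs ih => simp [List.foldl, ih]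

theorem pv_not_allEq_len (c : List Int) (h : ¬ (c.all (fun i => i == c.headI) = true)) :
    2 ≤ c.length := by
  match c with
  | [] => exact absurd (by simp) h
  | [a] => exact absurd (by simp) h
  | a :: b :: rest => simp

-- ===== PORT A =====
-- A's while-loop as tail recursion over (current, result); the generator
-- `all(i == current[0] for i in current)` is lazy, so current[0] is never an
-- IndexError on the empty list (all() is True there): ported as headI.
def get_next_values_go (current : List Int) (result : List (List Int)) : List (List Int) :=
  if current.all (fun i => i == current.headI) then
    result ++ [current]
  else
    get_next_values_go
      ((List.range (current.length - 1)).foldl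
        (fun nxt i => nxt ++ [current[i + 1]! - current[i]!]) [])
      (result ++ [current])
termination_by current.length
decreasing_by
  rw [pv_foldl_append]
  have := pv_not_allEq_len current (by assumption)
  simp; omega

def get_next_values (input : List Int) : List (List Int) :=
  get_next_values_go input []

-- ===== PORT B =====
def get_next_values_alt (input : List Int) : List (List Int) :=
  if input.all (fun i => i == input.headI) then
    [input]
  else
    [input] ++ get_next_values_alt
      ((List.range (input.length - 1)).map (fun i => input[i + 1]! - input[i]!))
termination_by input.length
decreasing_by
  have := pv_not_allEq_len input (by assumption)
  simp; omega

-- ===== PRECONDITION & SPEC =====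
def Spec_get_next_values (input : List Int) (out : List (List Int)) : Prop := out = get_next_values_alt input
instance (input : List Int) (out : List (List Int)) : Decidable (Spec_get_next_values input out) := by unfold Spec_get_next_values; infer_instance

-- ===== CLAIM (what is proved, stated in full; the proofs are below) =====
def Claim_equal_get_next_values : Prop := ∀ (input : List Int), Dom_get_next_values input → Spec_get_next_values input (get_next_values input)

-- ===== LEMMAS AND PROOFS =====
theorem pv_go_eq_alt : ∀ (n : Nat) (c : List Int), c.length ≤ n →
    ∀ (res : List (List Int)), get_next_values_go c res = res ++ get_next_values_alt c := by
  intro n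
  induction n with
  | zero =>
    intro c hc res
    have hc0 : c = [] := by
      cases c with
      | nil => rfl
      | cons a t => simp at hc
    subst hc0
    rw [get_next_values_go, get_next_values_alt]
    simp
  | succ n ih =>
    intro c hc res
    rw [get_next_values_go, get_next_values_alt]
    by_cases h : c.all (fun i => i == c.headI) = true
    · simp [h]
    · simp only [h]
      rw [pv_foldl_append]
      have hlen := pv_not_allEq_len c h
      rw [ih _ (by simp; omega)]
      simp

-- ===== VERDICT (by name: the statement is the Claim_ definition above) =====
theorem get_next_values_spec : Claim_equal_get_next_values := by
  intro input _
  unfold Spec_get_next_values get_next_values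
  exact (pv_go_eq_alt input.length input le_rfl []).trans (by simp)
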